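-- pv_equiv track=rewrite | github.com/Kobalik/Calculator | main.py | checkDotInString
-- ===== SOURCE A (Python) =====
-- def takeLastItem(strMath):
--     sNum = ''
--     listNumAndSymbol = []
--     strMath = strMath.replace(' ','')
--     for k in strMath:
--         if k.isdigit() or k == '.':
--             sNum += k
--         elif sNum:
--             listNumAndSymbol.append(sNum)
--             listNumAndSymbol.append(k)
--             sNum = ''
--         else:
--             listNumAndSymbol.append(k)
--
--     if sNum:
--         listNumAndSymbol.append(sNum)
--
--     return listNumAndSymbol[-1]
--
-- def checkDotInString(a):
--     num = takeLastItem(a)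
--     d = 0;
--     for k in str(num):
--         if k == '.':
--             d = d + 1
--     if d > 1:
--         return False
--     return True
-- ===== SOURCE B (Python) =====
-- def checkDotInString(a):
--     s = a.replace(' ', '')
--     i = len(s)
--     while i > 0 and (s[i - 1].isdigit() or s[i - 1] == '.'):
--         i -= 1
--     last = s[i:] if i < len(s) else s[-1]
--     return last.count('.') <= 1
-- ===== Notes on version B (the rewrite author's own statement) =====
-- stated objective: simpler
-- what changed: Replaces the full forward tokenizer (state machine building the whole token list, then taking [-1]) by a single backward scan from the end of the space-free string that isolates just the last token, then counts its dots.
import Mathlib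
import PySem

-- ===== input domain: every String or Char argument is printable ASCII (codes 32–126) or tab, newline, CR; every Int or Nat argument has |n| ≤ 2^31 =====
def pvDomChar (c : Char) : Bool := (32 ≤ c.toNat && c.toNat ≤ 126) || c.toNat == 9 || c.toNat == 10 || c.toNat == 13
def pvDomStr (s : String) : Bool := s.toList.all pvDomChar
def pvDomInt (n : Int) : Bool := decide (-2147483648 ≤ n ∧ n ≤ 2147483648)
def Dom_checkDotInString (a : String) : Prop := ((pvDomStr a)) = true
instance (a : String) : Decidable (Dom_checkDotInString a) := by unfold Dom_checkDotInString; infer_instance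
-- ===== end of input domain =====

-- B replaces A's forward tokenizing state machine (which builds the full token list and takes
-- its last element) by a single backward scan that isolates only the last token: simpler.
-- Both programs raise IndexError when the input has no non-space character; Pre_ excludes exactly that.

-- ===== PORT A =====
-- tokenizer loop of takeLastItem: state (sNum, listNumAndSymbol); the trailing 'if sNum: append' is the base case
def pvTokLoop : List Char → List Char → List (List Char) → List (List Char)
  | [], sNum, acc => if sNum ≠ [] then acc ++ [sNum] else acc
  | k :: rest, sNum, acc =>
    if PySem.Chars.isdigit k || k == '.' then pvTokLoop rest (sNum ++ [k]) acc
    else if sNum ≠ [] then pvTokLoop rest [] (acc ++ [sNum, [k]])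
    else pvTokLoop rest [] (acc ++ [[k]])

def takeLastItem (strMath : String) : Option (List Char) :=
  let s := PySem.Chars.replace strMath.toList [' '] []
  PySem.List.pyGet? (pvTokLoop s [] []) (-1)

def checkDotInString (a : String) : Bool :=
  match takeLastItem a with
  | none => true         -- Python raises IndexError here; excluded by Pre_
  | some num =>
    let d := num.foldl (fun d k => if k == '.' then d + 1 else d) (0 : Int)
    if d > 1 then false else true

-- ===== PORT B =====
-- 'while i > 0 and (s[i-1].isdigit() or s[i-1] == "."): i -= 1', transcribed as recursion on i
def pvScanBack (s : List Char) : Nat → Nat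
  | 0 => 0
  | i + 1 =>
    if PySem.Chars.isdigit (s.getD i ' ') || s.getD i ' ' == '.' then pvScanBack s i
    else i + 1

def checkDotInString_alt (a : String) : Bool :=
  let s := PySem.Chars.replace a.toList [' '] []
  let i := pvScanBack s s.length
  let last : List Char :=
    if i < s.length then s.drop i
    else match PySem.List.pyGet? s (-1) with
      | some c => [c]
      | none => []     -- Python raises IndexError here; excluded by Pre_
  decide (PySem.Chars.count last ['.'] ≤ 1)

-- ===== PRECONDITION & SPEC =====
-- Pre_ excludes exactly the inputs whose space-free form is empty: there A (and B) raise IndexError.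
def Pre_checkDotInString (a : String) : Prop :=
  PySem.Chars.replace a.toList [' '] [] ≠ []
instance (a : String) : Decidable (Pre_checkDotInString a) := by
  unfold Pre_checkDotInString; infer_instance

def pvWitness_checkDotInString : String := "1.2+3"

def Spec_checkDotInString (a : String) (out : Bool) : Prop := out = checkDotInString_alt a
instance (a : String) (out : Bool) : Decidable (Spec_checkDotInString a out) := by
  unfold Spec_checkDotInString; infer_instance

-- ===== CLAIM (what is proved, stated in full; the proofs are below) =====
def Claim_equal_checkDotInString : Prop :=
  ∀ (a : String), Dom_checkDotInString a → Pre_checkDotInString a →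
    Spec_checkDotInString a (checkDotInString a)

-- ===== LEMMAS AND PROOFS =====

-- the token-character predicate both programs test
def pvTokChar (c : Char) : Bool := PySem.Chars.isdigit c || c == '.'

-- the trailing run of token characters of s (the last token when it is a number)
def pvRun (s : List Char) : List Char := (s.reverse.takeWhile pvTokChar).reverse

theorem pvTokLoop_append (s : List Char) :
    ∀ sNum acc, pvTokLoop s sNum acc = acc ++ pvTokLoop s sNum [] := by
  induction s with
  | nil => intro sNum acc; by_cases h : sNum ≠ [] <;> simp [pvTokLoop, h]
  | cons k rest ih =>
    intro sNum acc
    by_cases hk : (PySem.Chars.isdigit k || k == '.') = true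
    · simp only [pvTokLoop, hk, if_true]
      exact ih _ _
    · by_cases hs : sNum ≠ []
      · simp only [pvTokLoop, hk, hs, if_true, if_false, Bool.false_eq_true,
          List.nil_append]
        rw [ih [] (acc ++ [sNum, [k]]), ih [] [sNum, [k]]]
        simp [hs]
      · simp only [pvTokLoop, hk, hs, if_true, if_false, Bool.false_eq_true,
          List.nil_append]
        rw [ih [] (acc ++ [[k]]), ih [] [[k]]]
        simp [not_ne_iff.mp hs]

theorem pvTokLoop_ne_nil (s : List Char) :
    ∀ sNum acc, (s ≠ [] ∨ sNum ≠ [] ∨ acc ≠ []) → pvTokLoop s sNum acc ≠ [] := by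
  induction s with
  | nil =>
    intro sNum acc h
    by_cases hs : sNum ≠ [] <;> simp [pvTokLoop, hs] <;> tauto
  | cons k rest ih =>
    intro sNum acc _
    by_cases hk : (PySem.Chars.isdigit k || k == '.') = true
    · simp only [pvTokLoop, hk, if_true]
      exact ih _ _ (Or.inr (Or.inl (by simp)))
    · by_cases hs : sNum ≠ []
      · simp only [pvTokLoop, hk, if_false, Bool.false_eq_true]
        rw [if_pos hs]
        exact ih _ _ (Or.inr (Or.inr (by simp)))
      · simp only [pvTokLoop, hk, if_false, Bool.false_eq_true]
        rw [if_neg hs]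
        exact ih _ _ (Or.inr (Or.inr (by simp)))

theorem pvRun_cons_of_not_all (k : Char) (rest : List Char)
    (hall : ¬ rest.all pvTokChar = true) : pvRun (k :: rest) = pvRun rest := by
  simp only [pvRun, List.reverse_cons]
  rw [List.takeWhile_append]
  rw [if_neg]
  intro h
  have heq := (List.takeWhile_sublist pvTokChar (l := rest.reverse)).eq_of_length h
  have : ∀ x ∈ rest.reverse, pvTokChar x = true := List.takeWhile_eq_self_iff.mp heq
  simp only [List.all_eq_true] at hall
  exact hall (fun x hx => this x (List.mem_reverse.mpr hx))

theorem pvRun_cons_of_all (k : Char) (rest : List Char)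
    (hall : rest.all pvTokChar = true) :
    pvRun (k :: rest) = (List.takeWhile pvTokChar [k]).reverse ++ rest := by
  simp only [pvRun, List.reverse_cons]
  rw [List.takeWhile_append]
  have heq : List.takeWhile pvTokChar rest.reverse = rest.reverse := by
    apply List.takeWhile_eq_self_iff.mpr
    simp only [List.all_eq_true] at hall
    exact fun x hx => hall x (List.mem_reverse.mp hx)
  rw [if_pos (by rw [heq])]
  simp

theorem pvRun_of_all (s : List Char) (hall : s.all pvTokChar = true) :
    pvRun s = s := by
  simp only [pvRun]
  rw [List.takeWhile_eq_self_iff.mpr ?_]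
  · simp
  · simp only [List.all_eq_true] at hall
    exact fun x hx => hall x (List.mem_reverse.mp hx)

-- A's takeLastItem loop returns, as last token: the whole rest if everything is a number
-- character, else the trailing number run if there is one, else the last (symbol) character
theorem pvTokLoop_last (s : List Char) :
    ∀ sNum, (s ≠ [] ∨ sNum ≠ []) →
      (pvTokLoop s sNum []).getLast? =
        if s.all pvTokChar then some (sNum ++ s)
        else if pvRun s = [] then s.getLast?.map (fun c => [c])
        else some (pvRun s) := by
  induction s with
  | nil =>
    intro sNum h
    have hs : sNum ≠ [] := by tauto
    simp [pvTokLoop, hs]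
  | cons k rest ih =>
    intro sNum _
    by_cases hk : pvTokChar k
    · have hk' : (PySem.Chars.isdigit k || k == '.') = true := hk
      rw [show pvTokLoop (k :: rest) sNum [] = pvTokLoop rest (sNum ++ [k]) [] by
            simp [pvTokLoop, hk']]
      rw [ih (sNum ++ [k]) (Or.inr (by simp))]
      by_cases hall : rest.all pvTokChar
      · have : (k :: rest).all pvTokChar = true := by simp [hall, hk]
        simp [hall, this]
      · have hne : rest ≠ [] := by rintro rfl; simp at hall
        have hallk : ¬ ((k :: rest).all pvTokChar = true) := by simp [hall]
        have hlast : (k :: rest).getLast? = rest.getLast? := by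
          cases rest with
          | nil => simp at hne
          | cons a b => simp [List.getLast?_cons_cons]
        simp only [if_neg hall, if_neg hallk, pvRun_cons_of_not_all k rest hall, hlast]
    · have hk' : ¬ ((PySem.Chars.isdigit k || k == '.') = true) := hk
      have hallk : ¬ ((k :: rest).all pvTokChar = true) := by
        simp only [List.all_cons, Bool.and_eq_true]
        intro h
        exact hk h.1
      obtain ⟨acc, hacclast, heq⟩ :
          ∃ acc : List (List Char), acc.getLast? = some [k] ∧
            pvTokLoop (k :: rest) sNum [] = acc ++ pvTokLoop rest [] [] := by
        by_cases hs : sNum ≠ []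
        · refine ⟨[sNum, [k]], by simp, ?_⟩
          have h1 : pvTokLoop (k :: rest) sNum [] = pvTokLoop rest [] [sNum, [k]] := by
            simp [pvTokLoop, hk', hs]
          rw [h1, pvTokLoop_append]
        · refine ⟨[[k]], by simp, ?_⟩
          have h1 : pvTokLoop (k :: rest) sNum [] = pvTokLoop rest [] [[k]] := by
            simp [pvTokLoop, hk', hs]
          rw [h1, pvTokLoop_append]
      rw [heq]
      by_cases hne : rest = []
      · subst hne
        have h0 : pvTokLoop [] [] [] = ([] : List (List Char)) := by simp [pvTokLoop]
        rw [h0, List.append_nil]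
        have hrunk : pvRun [k] = [] := by simp [pvRun, hk]
        simp [hrunk, hacclast, hk]
      · have ihr := ih [] (Or.inl hne)
        have hnenil : pvTokLoop rest [] [] ≠ [] :=
          pvTokLoop_ne_nil rest [] [] (Or.inl hne)
        rw [List.getLast?_append_of_ne_nil acc hnenil, ihr]
        have hlast : (k :: rest).getLast? = rest.getLast? := by
          cases rest with
          | nil => simp at hne
          | cons a b => simp [List.getLast?_cons_cons]
        by_cases hall : rest.all pvTokChar
        · have hrun : pvRun (k :: rest) = rest := by
            rw [pvRun_cons_of_all k rest hall]
            simp [hk]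
          simp only [if_pos hall, if_neg hallk, hrun, pvRun_of_all rest hall,
            List.nil_append]
          rw [if_neg hne]
        · simp only [if_neg hall, if_neg hallk, pvRun_cons_of_not_all k rest hall, hlast]

theorem pvScanBack_stable (u : List Char) (t : List Char) :
    ∀ (i : Nat), i ≤ t.length → pvScanBack (t ++ u) i = pvScanBack t i := by
  intro i
  induction i with
  | zero => intro _; rfl
  | succ j ih =>
    intro hj
    have hg : (t ++ u).getD j ' ' = t.getD j ' ' := by
      simp [List.getD, List.getElem?_append_left (by omega : j < t.length)]
    simp only [pvScanBack, hg]
    split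
    · exact ih (by omega)
    · rfl

-- B's backward scan stops exactly at the start of the trailing number run
theorem pvScanBack_run (s : List Char) :
    pvScanBack s s.length = s.length - (pvRun s).length := by
  induction s using List.reverseRecOn with
  | nil => rfl
  | append_singleton t c ih =>
    have hlen : (t ++ [c]).length = t.length + 1 := by simp
    rw [hlen]
    have hg : (t ++ [c]).getD t.length ' ' = c := by
      simp [List.getD]
    simp only [pvScanBack, hg]
    by_cases hc : pvTokChar c
    · have hc' : (PySem.Chars.isdigit c || c == '.') = true := hc
      rw [if_pos hc', pvScanBack_stable [c] t t.length le_rfl, ih]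
      have : pvRun (t ++ [c]) = pvRun t ++ [c] := by
        simp [pvRun, hc]
      rw [this]
      have := (List.takeWhile_sublist pvTokChar (l := t.reverse)).length_le
      simp [pvRun] at *
    · have hc' : ¬ (PySem.Chars.isdigit c || c == '.') = true := hc
      rw [if_neg hc']
      have : pvRun (t ++ [c]) = [] := by
        simp [pvRun, hc]
      rw [this]
      simp

theorem pvCountGo_singleton (c : Char) :
    ∀ (l : List Char) (acc : Nat),
      PySem.Chars.count.go [c] l.length l acc = acc + l.count c := by
  intro l
  induction l with
  | nil => intro acc; simp [PySem.Chars.count.go]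
  | cons h t ih =>
    intro acc
    by_cases hc : c = h
    · subst hc
      simp [PySem.Chars.count.go, List.isPrefixOf, ih, List.count_cons]
      omega
    · simp [PySem.Chars.count.go, List.isPrefixOf, hc, ih]
      simp [List.count_cons, show ¬h = c from fun h2 => hc h2.symm]

theorem pvCount_singleton (l : List Char) (c : Char) :
    PySem.Chars.count l [c] = l.count c := by
  simp [PySem.Chars.count, pvCountGo_singleton]

theorem pvPyGet_neg_one {α : Type} (l : List α) (h : l ≠ []) :
    PySem.List.pyGet? l (-1) = l.getLast? := by
  have hlen : 0 < l.length := List.length_pos_iff.mpr h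
  simp only [PySem.List.pyGet?, PySem.List.pyIdx?]
  rw [if_neg (by omega), if_pos (by omega : -(l.length : Int) ≤ -1)]
  simp only [Option.bind_some]
  rw [List.getLast?_eq_getElem?]
  norm_num

theorem pvRun_suffix (s : List Char) : pvRun s <:+ s := by
  have h := List.takeWhile_prefix (l := s.reverse) pvTokChar
  have h2 : (s.reverse.takeWhile pvTokChar).reverse <:+ s.reverse.reverse :=
    List.reverse_suffix.mpr h
  simpa [pvRun] using h2

theorem pvRun_drop (s : List Char) :
    s.drop (s.length - (pvRun s).length) = pvRun s := by
  set r := pvRun s with hr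
  obtain ⟨t, ht⟩ := pvRun_suffix s
  rw [← hr] at ht
  rw [← ht]
  have h1 : (t ++ r).length - r.length = t.length := by simp
  rw [h1, List.drop_left]

-- both programs reduce to 'the dot count of the same last token is at most 1'
theorem pvMain (s : List Char) (hs : s ≠ []) :
    (match PySem.List.pyGet? (pvTokLoop s [] []) (-1) with
     | none => true
     | some num =>
       if num.foldl (fun d k => if k == '.' then d + 1 else d) (0 : Int) > 1 then false
       else true)
    =
    (let i := pvScanBack s s.length
     let last : List Char :=
       if i < s.length then s.drop i
       else match PySem.List.pyGet? s (-1) with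
         | some c => [c]
         | none => []
     decide (PySem.Chars.count last ['.'] ≤ 1)) := by
  rw [pvPyGet_neg_one _ (pvTokLoop_ne_nil s [] [] (Or.inl hs)),
      pvTokLoop_last s [] (Or.inl hs), pvScanBack_run s, pvPyGet_neg_one s hs]
  obtain ⟨c, hc⟩ : ∃ c, s.getLast? = some c := by
    cases h : s.getLast? with
    | none => exact absurd (List.getLast?_eq_none_iff.mp h) hs
    | some c => exact ⟨c, rfl⟩
  by_cases hrun : pvRun s = []
  · have hall : ¬ s.all pvTokChar = true := by
      intro h
      exact hs (by rw [← pvRun_of_all s h, hrun])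
    rw [if_neg hall, if_pos hrun, hc, hrun]
    have hi : ¬ s.length - ([] : List Char).length < s.length := by simp
    simp only [Option.map_some, if_neg hi, hc]
    rw [PySem.List.foldl_beq_add_one, pvCount_singleton]
    have h1 : List.count '.' [c] ≤ 1 := by
      cases Classical.em (c = '.') with
      | inl h => simp [h]
      | inr h => simp [List.count_cons, h]
    rw [if_neg (by push_cast; omega)]
    simp
    omega
  · have hlen : 0 < (pvRun s).length := List.length_pos_iff.mpr hrun
    have hle : (pvRun s).length ≤ s.length := (pvRun_suffix s).length_le
    have hslen : 0 < s.length := List.length_pos_iff.mpr hs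
    have hi : s.length - (pvRun s).length < s.length := by omega
    simp only [if_pos hi, pvRun_drop s]
    have hnum : (if s.all pvTokChar then some (([] : List Char) ++ s)
        else if pvRun s = [] then s.getLast?.map (fun c => [c])
        else some (pvRun s)) = some (pvRun s) := by
      by_cases hall : s.all pvTokChar
      · rw [if_pos hall, pvRun_of_all s hall]
        simp
      · rw [if_neg hall, if_neg hrun]
    rw [hnum]
    simp only []
    rw [PySem.List.foldl_beq_add_one, pvCount_singleton]
    by_cases h1 : List.count '.' (pvRun s) ≤ 1
    · rw [if_neg (by push_cast; omega)]
      simp [h1]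
    · rw [if_pos (by push_cast; omega)]
      simp [h1]

-- ===== VERDICT (by name: the statement is the Claim_ definition above) =====
theorem checkDotInString_spec : Claim_equal_checkDotInString := by
  intro a _ hPre
  unfold Spec_checkDotInString checkDotInString checkDotInString_alt takeLastItem
  exact pvMain _ hPre
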